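-- pv_equiv track=rewrite | github.com/Thinato/memory_allocation | Program.py | get_worst
-- ===== SOURCE A (Python) =====
-- empty     = "_"
--
-- allocated = "X"
--
-- def get_worst(m, x, y):
--     counter = 0
--     highest = 0
--
--     start_X = 0
--     start_Y = 0
--
--     h_X = 0
--     h_Y = 0
--
--     for i in range(x):
--         for j in range(y):
--             if m[i][j] == empty:
--                 counter+=1
--             elif m[i][j] == allocated:
--                 counter = 0
--             if counter == 1:
--                 start_X = i
--                 start_Y = j
--             if counter > highest:
--                 highest = counter
--                 h_X = start_X
--                 h_Y = start_Y
--     return h_X, h_Y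
-- ===== SOURCE B (Python) =====
-- def get_worst(m, x, y):
--     cells = [m[i][j] for i in range(x) for j in range(y)]
--     runs = []          # (flat start position, length) of each maximal run of "_"
--     start = None
--     for p, cell in enumerate(cells):
--         if cell == "_":
--             if start is None:
--                 start = p
--         else:
--             if start is not None:
--                 runs.append((start, p - start))
--                 start = None
--     if start is not None:
--         runs.append((start, len(cells) - start))
--     if not runs:
--         return (0, 0)
--     best = max(runs, key=lambda r: r[1])
--     return divmod(best[0], y)
-- ===== Notes on version B (the rewrite author's own statement) =====
-- stated objective: alternative
-- what changed: A's six-variable stateful nested scan is replaced by a flatten / extract-maximal-runs / pick-max pipeline (run list built in one pass, best run chosen with max, coordinate recovered by divmod); Pre_ excludes inputs where A raises IndexError, and grid cells other than '_' and 'X' (outside the allocation grid's alphabet), where treating the unknown cell as neutral (A) or as a run breaker (B) are both defensible readings of an unspecified corner.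
-- outside the precondition, e.g. on get_worst([['_', 'a', '_']], 1, 3): A returns (0, 1), B returns (0, 0)
import Mathlib
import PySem

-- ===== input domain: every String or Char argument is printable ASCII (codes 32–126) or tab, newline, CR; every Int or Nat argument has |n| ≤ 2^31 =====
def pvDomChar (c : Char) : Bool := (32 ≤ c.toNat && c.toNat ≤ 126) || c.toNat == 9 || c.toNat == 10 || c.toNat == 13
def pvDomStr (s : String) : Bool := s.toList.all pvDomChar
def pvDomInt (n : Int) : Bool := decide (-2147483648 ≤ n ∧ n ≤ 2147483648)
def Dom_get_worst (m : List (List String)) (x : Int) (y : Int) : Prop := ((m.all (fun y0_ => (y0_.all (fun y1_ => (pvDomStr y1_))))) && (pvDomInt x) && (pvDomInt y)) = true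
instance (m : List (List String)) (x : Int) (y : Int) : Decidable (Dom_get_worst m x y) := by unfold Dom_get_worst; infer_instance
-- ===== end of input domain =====

-- B replaces A's six-variable stateful nested scan by a flatten / extract-maximal-runs / pick-max pipeline (alternative decomposition, same cost); equivalence is proved on the grid's natural alphabet, where A does not raise.

-- ===== PORT A =====
-- m[i][j] (both ports index the matrix the same way; IndexError = none, excluded by Pre_)
def cellAt (m : List (List String)) (i j : Int) : String :=
  ((PySem.List.pyGet? m i).bind (fun row => PySem.List.pyGet? row j)).getD ""

-- state: (counter, highest, start_X, start_Y, h_X, h_Y)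
def aStep (m : List (List String)) (st : Int × Int × Int × Int × Int × Int) (i j : Int) :
    Int × Int × Int × Int × Int × Int :=
  let cell := cellAt m i j
  let counter := if cell = "_" then st.1 + 1 else if cell = "X" then 0 else st.1
  let sX := if counter = 1 then i else st.2.2.1
  let sY := if counter = 1 then j else st.2.2.2.1
  if counter > st.2.1 then (counter, counter, sX, sY, sX, sY)
  else (counter, st.2.1, sX, sY, st.2.2.2.2)

def get_worst (m : List (List String)) (x : Int) (y : Int) : Int × Int :=
  let fin := (PySem.List.pyRange 0 x 1).foldl
    (fun st i => (PySem.List.pyRange 0 y 1).foldl (fun st j => aStep m st i j) st)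
    (0, 0, 0, 0, 0, 0)
  fin.2.2.2.2

-- ===== PORT B =====
-- one step of Source B's run-extraction loop; state = (runs, start : Option Int), p the flat position
def bStep (st : List (Int × Int) × Option Int) (p : Int) (cell : String) :
    List (Int × Int) × Option Int :=
  if cell = "_" then
    match st.2 with
    | none => (st.1, some p)
    | some s => (st.1, some s)
  else
    match st.2 with
    | none => st
    | some s => (st.1 ++ [(s, p - s)], none)

def get_worst_alt (m : List (List String)) (x : Int) (y : Int) : Int × Int :=
  let cells := (PySem.List.pyRange 0 x 1).flatMap (fun i =>
    (PySem.List.pyRange 0 y 1).map (fun j => cellAt m i j))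
  let r := (PySem.List.enumerate cells).foldl (fun st pc => bStep st pc.1 pc.2) ([], none)
  let runs := match r.2 with
    | some s => r.1 ++ [(s, (cells.length : Int) - s)]
    | none => r.1
  match PySem.List.max? runs (fun r => r.2) with
  | none => (0, 0)
  | some best => (PySem.Int.divmod? best.1 y).getD (0, 0)  -- runs ≠ [] forces y ≥ 1, so divmod is total here

-- ===== PRECONDITION & SPEC =====
-- Pre_ excludes (a) inputs where A raises IndexError, and (b) grids whose visited cells are not all
-- "_"/"X" — outside the allocation grid's alphabet; whether an unknown cell is neutral (A) or breaks
-- the run (B) is an unspecified corner, so both values are defensible and such inputs are excluded.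
def Pre_get_worst (m : List (List String)) (x : Int) (y : Int) : Prop :=
  y ≤ 0 ∨ (x ≤ (m.length : Int) ∧ ∀ r ∈ m.take x.toNat,
    y ≤ (r.length : Int) ∧ ∀ c ∈ r.take y.toNat, c = "_" ∨ c = "X")
instance (m : List (List String)) (x : Int) (y : Int) : Decidable (Pre_get_worst m x y) := by
  unfold Pre_get_worst; infer_instance
def pvWitness_get_worst : List (List String) × Int × Int := ([["_", "X"], ["_", "_"]], 2, 2)

def Spec_get_worst (m : List (List String)) (x : Int) (y : Int) (out : Int × Int) : Prop := out = get_worst_alt m x y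
instance (m : List (List String)) (x : Int) (y : Int) (out : Int × Int) : Decidable (Spec_get_worst m x y out) := by unfold Spec_get_worst; infer_instance

-- ===== CLAIM (what is proved, stated in full; the proofs are below) =====
def Claim_equal_get_worst : Prop := ∀ (m : List (List String)) (x : Int) (y : Int), Dom_get_worst m x y → Pre_get_worst m x y → Spec_get_worst m x y (get_worst m x y)

-- ===== LEMMAS AND PROOFS =====

-- flat-world version of A's step/loop (positions are flat indices; state (counter, highest, start, h))
def stepF (st : Int × Int × Int × Int) (p : Int) (v : String) : Int × Int × Int × Int :=
  let c := if v = "_" then st.1 + 1 else if v = "X" then 0 else st.1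
  let s := if c = 1 then p else st.2.2.1
  if c > st.2.1 then (c, c, s, s) else (c, st.2.1, s, st.2.2.2)

def foldF : (Int × Int × Int × Int) → Int → List String → (Int × Int × Int × Int)
  | st, _, [] => st
  | st, p, v :: vs => foldF (stepF st p v) (p + 1) vs

theorem foldF_append (l1 l2 : List String) : ∀ (st : Int × Int × Int × Int) (p : Int),
    foldF st p (l1 ++ l2) = foldF (foldF st p l1) (p + l1.length) l2 := by
  induction l1 with
  | nil => intro st p; simp [foldF]
  | cons v vs ih =>
    intro st p
    simp only [List.cons_append, foldF]
    rw [ih]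
    congr 1
    simp only [List.length_cons]
    push_cast
    ring

-- closed forms of one flat A-step on an empty / allocated cell
theorem stepF_empty (c hi s h p : Int) :
    stepF (c, hi, s, h) p "_" =
      (c + 1, if hi ≤ c then c + 1 else hi, (if c = 0 then p else s),
        if hi ≤ c then (if c = 0 then p else s) else h) := by
  simp only [stepF]
  norm_num
  split_ifs <;> simp

theorem stepF_alloc (c hi s h p : Int) (hhi : 0 ≤ hi) :
    stepF (c, hi, s, h) p "X" = (0, hi, s, h) := by
  have hne : ("X" : String) = "_" ↔ False := by simp
  simp only [stepF, hne, if_false, reduceIte]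
  rw [if_neg (by omega)]
  norm_num

-- flat-world version of B's run-extraction loop
def bFoldFlat : (List (Int × Int) × Option Int) → Int → List String → List (Int × Int) × Option Int
  | st, _, [] => st
  | st, p, v :: vs => bFoldFlat (bStep st p v) (p + 1) vs

theorem enum_fold (vs : List String) : ∀ (st : List (Int × Int) × Option Int) (p : Int),
    (PySem.List.enumerate vs p).foldl (fun st pc => bStep st pc.1 pc.2) st = bFoldFlat st p vs := by
  induction vs with
  | nil => intro st p; simp [PySem.List.enumerate_nil, bFoldFlat]
  | cons v vs ih =>
    intro st p
    rw [PySem.List.enumerate_cons]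
    simp only [List.foldl_cons, bFoldFlat]
    exact ih _ _

-- the fold step of Python's max(runs, key=lambda r: r[1]) (first maximal element)
def mstep (acc : Option (Int × Int)) (r : Int × Int) : Option (Int × Int) :=
  match acc with
  | none => some r
  | some mx => if mx.2 < r.2 then some r else some mx

theorem max?_eq_fold (runs : List (Int × Int)) :
    PySem.List.max? runs (fun r => r.2) = runs.foldl mstep none := by
  unfold PySem.List.max?
  apply List.foldl_ext
  intro acc x _
  cases acc <;> rfl

-- close the trailing open run at end-of-scan position n (the tail of Source B's loop)
def closeRuns (st : List (Int × Int) × Option Int) (n : Int) : List (Int × Int) :=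
  match st.2 with
  | some s => st.1 ++ [(s, n - s)]
  | none => st.1

-- relation between the closed-run fold value and A's (highest, h)
def closedInv (FC : Option (Int × Int)) (hi h : Int) : Prop :=
  (FC = none ∧ hi = 0 ∧ h = 0) ∨ (FC = some (h, hi) ∧ 1 ≤ hi)

theorem foldl_mstep_append (runs : List (Int × Int)) (r : Int × Int) :
    (runs ++ [r]).foldl mstep none = mstep (runs.foldl mstep none) r := by
  simp

-- ===== the main correspondence: A's one-pass flat scan vs B's run extraction + max =====
theorem main_inv (vs : List String) :
    ∀ (p c hi s h : Int) (runs : List (Int × Int)) (cur : Option Int),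
    (∀ v ∈ vs, v = "_" ∨ v = "X") →
    (match cur with
     | none => c = 0
     | some s0 => 1 ≤ c ∧ c = p - s0 ∧ s = s0) →
    (match cur with
     | none => closedInv (runs.foldl mstep none) hi h
     | some s0 => closedInv (mstep (runs.foldl mstep none) (s0, c)) hi h) →
    closedInv ((closeRuns (bFoldFlat (runs, cur) p vs) (p + vs.length)).foldl mstep none)
      (foldF (c, hi, s, h) p vs).2.1 (foldF (c, hi, s, h) p vs).2.2.2 := by
  induction vs with
  | nil =>
    intro p c hi s h runs cur _ hcur hfold
    cases cur with
    | none =>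
      simpa [bFoldFlat, closeRuns, foldF] using hfold
    | some s0 =>
      obtain ⟨hc1, hc2, hc3⟩ := hcur
      have : p + ((List.nil : List String).length : Int) - s0 = c := by simp; omega
      simp only [bFoldFlat, closeRuns, foldF, foldl_mstep_append, this]
      exact hfold
  | cons v vs ih =>
    intro p c hi s h runs cur hab hcur hfold
    have hv := hab v (by simp)
    have hab' : ∀ w ∈ vs, w = "_" ∨ w = "X" := fun w hw => hab w (by simp [hw])
    have hlen : p + ((v :: vs).length : Int) = (p + 1) + (vs.length : Int) := by
      simp; omega
    rw [hlen]
    rcases hv with hv | hv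
    · -- v = "_"
      subst hv
      cases cur with
      | none =>
        -- start a new run at p
        have hstepB : bStep (runs, (none : Option Int)) p "_" = (runs, some p) := by
          simp [bStep]
        have hc0 : c = 0 := hcur
        subst hc0
        rcases hfold with ⟨hFC, hhi, hh⟩ | ⟨hFC, hhi⟩
        · -- no closed runs yet: A records (1,1,p,p)
          have hstepA : stepF (0, hi, s, h) p "_" = (1, 1, p, p) := by
            rw [stepF_empty]
            norm_num [hhi]
          simp only [bFoldFlat, hstepB, foldF, hstepA]
          refine ih (p + 1) 1 1 p p runs (some p) hab' ⟨le_refl 1, by omega, rfl⟩ ?_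
          rw [hFC]
          exact Or.inr ⟨rfl, le_refl 1⟩
        · -- best so far has hi ≥ 1: A keeps it
          have hstepA : stepF (0, hi, s, h) p "_" = (1, hi, p, h) := by
            rw [stepF_empty]
            simp only [if_neg (show ¬ hi ≤ (0:Int) from by omega)]
            norm_num
          simp only [bFoldFlat, hstepB, foldF, hstepA]
          refine ih (p + 1) 1 hi p h runs (some p) hab' ⟨le_refl 1, by omega, rfl⟩ ?_
          rw [hFC]
          simp only [mstep]
          rw [if_neg (by simp; omega)]
          exact Or.inr ⟨rfl, hhi⟩
      | some s0 =>
        -- extend the open run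
        obtain ⟨hc1, hc2, hc3⟩ := hcur
        have hstepB : bStep (runs, some s0) p "_" = (runs, some s0) := by simp [bStep]
        rcases hfold with ⟨hFC, _, _⟩ | ⟨hFC, hhi⟩
        · exact absurd hFC (by
            cases hF : runs.foldl mstep none <;> simp only [mstep] <;>
              [skip; split_ifs] <;> simp)
        have hgoal : ∀ hi' h', closedInv (mstep (runs.foldl mstep none) (s0, c + 1)) hi' h' →
            closedInv ((closeRuns (bFoldFlat (runs, some s0) (p+1) vs) ((p+1) + vs.length)).foldl mstep none)
              (foldF (c + 1, hi', s, h') (p+1) vs).2.1 (foldF (c + 1, hi', s, h') (p+1) vs).2.2.2 := by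
          intro hi' h' hf
          exact ih (p + 1) (c + 1) hi' s h' runs (some s0) hab' ⟨by omega, by omega, hc3⟩ hf
        cases hF : runs.foldl mstep none with
        | none =>
          rw [hF] at hFC
          simp only [mstep, Option.some.injEq, Prod.mk.injEq] at hFC
          obtain ⟨hh1, hh2⟩ := hFC
          have hstepA : stepF (c, hi, s, h) p "_" = (c + 1, c + 1, s, s) := by
            rw [stepF_empty]
            simp only [if_pos (show hi ≤ c from by omega),
              if_neg (show ¬ c = (0:Int) from by omega)]
          simp only [bFoldFlat, hstepB, foldF, hstepA]
          refine hgoal (c + 1) s ?_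
          rw [hF]
          simp only [mstep]
          exact Or.inr ⟨by rw [hc3], by omega⟩
        | some gb =>
          obtain ⟨g, b⟩ := gb
          rw [hF] at hFC
          simp only [mstep] at hFC
          by_cases hlt : b < c
          · rw [if_pos hlt] at hFC
            simp only [Option.some.injEq, Prod.mk.injEq] at hFC
            obtain ⟨hh1, hh2⟩ := hFC
            have hstepA : stepF (c, hi, s, h) p "_" = (c + 1, c + 1, s, s) := by
              rw [stepF_empty]
              simp only [if_pos (show hi ≤ c from by omega),
                if_neg (show ¬ c = (0:Int) from by omega)]
            simp only [bFoldFlat, hstepB, foldF, hstepA]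
            refine hgoal (c + 1) s ?_
            rw [hF]
            simp only [mstep]
            rw [if_pos (by simp; omega)]
            exact Or.inr ⟨by rw [hc3], by omega⟩
          · rw [if_neg hlt] at hFC
            simp only [Option.some.injEq, Prod.mk.injEq] at hFC
            obtain ⟨hh1, hh2⟩ := hFC
            by_cases heq : b = c
            · -- tie: the new longer current run takes over
              have hstepA : stepF (c, hi, s, h) p "_" = (c + 1, c + 1, s, s) := by
                rw [stepF_empty]
                simp only [if_pos (show hi ≤ c from by omega),
                  if_neg (show ¬ c = (0:Int) from by omega)]
              simp only [bFoldFlat, hstepB, foldF, hstepA]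
              refine hgoal (c + 1) s ?_
              rw [hF]
              simp only [mstep]
              rw [if_pos (by simp; omega)]
              exact Or.inr ⟨by rw [hc3], by omega⟩
            · -- b > c: best unchanged
              have hstepA : stepF (c, hi, s, h) p "_" = (c + 1, hi, s, h) := by
                rw [stepF_empty]
                simp only [if_neg (show ¬ hi ≤ c from by omega),
                  if_neg (show ¬ c = (0:Int) from by omega)]
              simp only [bFoldFlat, hstepB, foldF, hstepA]
              refine hgoal hi h ?_
              rw [hF]
              simp only [mstep]
              rw [if_neg (by simp; omega)]
              exact Or.inr ⟨by rw [hh1, hh2], hhi⟩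
    · -- v = "X"
      subst hv
      cases cur with
      | none =>
        have hc0 : c = 0 := hcur
        subst hc0
        have hhi0 : 0 ≤ hi := by
          rcases hfold with ⟨_, hhi, _⟩ | ⟨_, hhi⟩ <;> omega
        have hstepB : bStep (runs, (none : Option Int)) p "X" = (runs, none) := by
          simp [bStep]
        have hstepA : stepF (0, hi, s, h) p "X" = (0, hi, s, h) :=
          stepF_alloc 0 hi s h p hhi0
        simp only [bFoldFlat, hstepB, foldF, hstepA]
        exact ih (p + 1) 0 hi s h runs none hab' rfl hfold
      | some s0 =>
        obtain ⟨hc1, hc2, hc3⟩ := hcur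
        have hstepB : bStep (runs, some s0) p "X" = (runs ++ [(s0, p - s0)], none) := by
          simp [bStep]
        rcases hfold with ⟨hFC, _, _⟩ | ⟨hFC, hhi⟩
        · exact absurd hFC (by
            cases hF : runs.foldl mstep none <;> simp only [mstep] <;>
              [skip; split_ifs] <;> simp)
        have hstepA : stepF (c, hi, s, h) p "X" = (0, hi, s, h) :=
          stepF_alloc c hi s h p (by omega)
        simp only [bFoldFlat, hstepB, foldF, hstepA]
        refine ih (p + 1) 0 hi s h (runs ++ [(s0, p - s0)]) none hab' rfl ?_
        rw [foldl_mstep_append, show p - s0 = c by omega, hFC]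
        exact Or.inr ⟨rfl, hhi⟩

-- ===== bridge: A's nested (i,j) loop is the flat fold under divmod =====
def mapSt (y : Int) (st : Int × Int × Int × Int) : Int × Int × Int × Int × Int × Int :=
  (st.1, st.2.1, PySem.Int.floordiv st.2.2.1 y, PySem.Int.mod st.2.2.1 y,
    PySem.Int.floordiv st.2.2.2 y, PySem.Int.mod st.2.2.2 y)

theorem divmod_flat (y i j : Int) (hy : 0 < y) (hj0 : 0 ≤ j) (hjy : j < y) :
    PySem.Int.floordiv (i * y + j) y = i ∧ PySem.Int.mod (i * y + j) y = j := by
  have hd : PySem.Int.floordiv (i * y + j) y = i := by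
    rw [PySem.Int.floordiv_eq_iff_of_pos hy]
    constructor <;> nlinarith
  refine ⟨hd, ?_⟩
  have := PySem.Int.floordiv_mul_add_mod (i * y + j) y
  rw [hd] at this
  omega

theorem step_bridge (m : List (List String)) (y i j : Int) (hy : 0 < y)
    (hj0 : 0 ≤ j) (hjy : j < y) (F : Int × Int × Int × Int) :
    aStep m (mapSt y F) i j = mapSt y (stepF F (i * y + j) (cellAt m i j)) := by
  obtain ⟨hd, hm⟩ := divmod_flat y i j hy hj0 hjy
  simp only [aStep, stepF, mapSt]
  split_ifs <;> simp [hd, hm]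

theorem inner_bridge (m : List (List String)) (y i : Int) (hy : 0 < y) :
    ∀ (n : Nat) (b : Int) (F : Int × Int × Int × Int), 0 ≤ b → b + n = y →
    (PySem.List.pyRange b y 1).foldl (fun st j => aStep m st i j) (mapSt y F)
      = mapSt y (foldF F (i * y + b) ((PySem.List.pyRange b y 1).map (fun j => cellAt m i j))) := by
  intro n
  induction n with
  | zero =>
    intro b F hb hby
    rw [PySem.List.pyRange_one_eq_nil (by omega)]
    simp [foldF]
  | succ k ihn =>
    intro b F hb hby
    rw [PySem.List.pyRange_one_cons (by omega)]
    simp only [List.foldl_cons, List.map_cons, foldF]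
    rw [step_bridge m y i b hy hb (by omega)]
    have harr : i * y + b + 1 = i * y + (b + 1) := by ring
    rw [harr]
    exact ihn (b + 1) (stepF F (i * y + b) (cellAt m i b)) (by omega) (by omega)

theorem outer_bridge (m : List (List String)) (x y : Int) (hy : 0 < y) :
    ∀ (n : Nat) (a : Int) (F : Int × Int × Int × Int), 0 ≤ a → a + n = x →
    (PySem.List.pyRange a x 1).foldl
        (fun st i => (PySem.List.pyRange 0 y 1).foldl (fun st j => aStep m st i j) st)
        (mapSt y F)
      = mapSt y (foldF F (a * y)
          ((PySem.List.pyRange a x 1).flatMap (fun i =>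
            (PySem.List.pyRange 0 y 1).map (fun j => cellAt m i j)))) := by
  intro n
  induction n with
  | zero =>
    intro a F ha hax
    rw [PySem.List.pyRange_one_eq_nil (show x ≤ a by omega)]
    simp [foldF]
  | succ k ihn =>
    intro a F ha hax
    rw [PySem.List.pyRange_one_cons (show a < x by omega)]
    simp only [List.foldl_cons, List.flatMap_cons]
    rw [foldF_append]
    have hrowlen : (((PySem.List.pyRange 0 y 1).map (fun j => cellAt m a j)).length : Int) = y := by
      simp [PySem.List.length_pyRange_one]
      omega
    have hinner := inner_bridge m y a hy y.toNat 0 F (le_refl 0) (by omega)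
    rw [add_zero] at hinner
    rw [hinner]
    have harr : a * y + (((PySem.List.pyRange 0 y 1).map (fun j => cellAt m a j)).length : Int)
        = (a + 1) * y := by rw [hrowlen]; ring
    rw [harr]
    exact ihn (a + 1) _ (by omega) (by omega)

-- every visited cell lies in the alphabet admitted by Pre_
theorem cells_alpha (m : List (List String)) (x y : Int)
    (hx : x ≤ (m.length : Int))
    (hrows : ∀ r ∈ m.take x.toNat, y ≤ (r.length : Int) ∧ ∀ c ∈ r.take y.toNat, c = "_" ∨ c = "X") :
    ∀ v ∈ (PySem.List.pyRange 0 x 1).flatMap (fun i =>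
      (PySem.List.pyRange 0 y 1).map (fun j => cellAt m i j)), v = "_" ∨ v = "X" := by
  intro v hv
  simp only [List.mem_flatMap, List.mem_map] at hv
  obtain ⟨i, hi, j, hj, hv⟩ := hv
  rw [PySem.List.mem_pyRange_one] at hi hj
  have hiN : i.toNat < m.length := by omega
  have hrow := hrows (m[i.toNat]) (by
    rw [List.mem_take_iff_getElem]
    exact ⟨i.toNat, by omega, by simp⟩)
  obtain ⟨hrlen, hcells⟩ := hrow
  have hjN : j.toNat < (m[i.toNat]).length := by omega
  have hi' : i = (i.toNat : Int) := by omega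
  have hj' : j = (j.toNat : Int) := by omega
  have hgen : cellAt m (i.toNat : Int) (j.toNat : Int) = (m[i.toNat])[j.toNat] := by
    unfold cellAt
    rw [PySem.List.pyGet?_natCast, List.getElem?_eq_getElem hiN]
    show (PySem.List.pyGet? (m[i.toNat]) (j.toNat : Int)).getD "" = _
    rw [PySem.List.pyGet?_natCast, List.getElem?_eq_getElem hjN]
    rfl
  have hcell : cellAt m i j = (m[i.toNat])[j.toNat] := by
    rw [← hi', ← hj'] at hgen
    exact hgen
  rw [← hv, hcell]
  exact hcells _ (by
    rw [List.mem_take_iff_getElem]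
    exact ⟨j.toNat, by omega, by simp⟩)

theorem get_worst_spec : Claim_equal_get_worst := by
  intro m x y hdom hpre
  unfold Spec_get_worst
  simp only [get_worst, get_worst_alt]
  by_cases hy : y ≤ 0
  · have h0 : ∀ (L : List Int), (L.flatMap (fun _ => ([] : List String))) = [] := by
      simp
    simp [PySem.List.pyRange_one_eq_nil hy, h0, PySem.List.enumerate_nil,
      PySem.List.max?]
  · rw [not_le] at hy
    rcases hpre with hpre | ⟨hx, hrows⟩
    · omega
    by_cases hx0 : x ≤ 0
    · have h0 : ((PySem.List.pyRange 0 x 1).flatMap (fun i =>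
          (PySem.List.pyRange 0 y 1).map (fun j => cellAt m i j))) = [] := by
        simp [PySem.List.pyRange_one_eq_nil hx0]
      simp [PySem.List.pyRange_one_eq_nil hx0, PySem.List.enumerate_nil,
        PySem.List.max?]
    · rw [not_le] at hx0
      have hfd0 : PySem.Int.floordiv 0 y = 0 := by
        rw [PySem.Int.floordiv_eq_ediv_of_pos hy]; simp
      have hmd0 : PySem.Int.mod 0 y = 0 := by
        rw [PySem.Int.mod_eq_emod_of_pos hy]; simp
      have hmap0 : mapSt y (0, 0, 0, 0) = (0, 0, 0, 0, 0, 0) := by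
        simp [mapSt, hfd0, hmd0]
      have hA := outer_bridge m x y hy x.toNat 0 (0, 0, 0, 0) le_rfl (by omega)
      rw [hmap0, zero_mul] at hA
      rw [hA]
      set cells := (PySem.List.pyRange 0 x 1).flatMap (fun i =>
        (PySem.List.pyRange 0 y 1).map (fun j => cellAt m i j)) with hcells
      have halpha : ∀ v ∈ cells, v = "_" ∨ v = "X" := cells_alpha m x y hx hrows
      have hmain := main_inv cells 0 0 0 0 0 [] none halpha rfl
        (Or.inl ⟨rfl, rfl, rfl⟩)
      rw [enum_fold cells ([], none) 0, max?_eq_fold]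
      set Bf := bFoldFlat ([], none) 0 cells with hBf
      have hclose : (match Bf.2 with
          | some s => Bf.1 ++ [(s, (cells.length : Int) - s)]
          | none => Bf.1) = closeRuns Bf ((0 : Int) + cells.length) := by
        unfold closeRuns
        cases Bf.2 <;> simp
      rw [hclose]
      set Af := foldF (0, 0, 0, 0) 0 cells with hAf
      rcases hmain with ⟨hFC, hhi, hh⟩ | ⟨hFC, hhi⟩
      · rw [hFC]
        simp [mapSt, hh, hfd0, hmd0]
      · rw [hFC]
        have hdm : PySem.Int.divmod? Af.2.2.2 y = some (PySem.Int.floordiv Af.2.2.2 y, PySem.Int.mod Af.2.2.2 y) := by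
          simp [PySem.Int.divmod?, PySem.Int.floordiv, PySem.Int.mod,
            show y ≠ 0 by omega]
        simp [mapSt, hdm]
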